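-- pv_equiv track=rewrite | github.com/cmiao9/adventofcode | 2015/day01/code.py | part1
-- ===== SOURCE A (Python) =====
-- def part1(instructions: list) -> list:
--     """
--     Returns list of final floors after parsing instructions list.
--
--     Args:
--         instructions (list): List of instruction strings in parentheses.
--
--     Returns:
--         list: List of final integer floors.
--     """
--     floors = []
--     for s in instructions:
--         floor = 0
--         for c in s:
--             floor = floor + 1 if (c == "(") else floor - 1
--         floors.append(floor)
--     return floors
-- ===== SOURCE B (Python) =====
-- def part1(instructions: list) -> list:
--     """Closed form: each '(' is +1, every other char is -1, so floor = 2*count('(') - len."""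
--     return [2 * s.count("(") - len(s) for s in instructions]
-- ===== Notes on version B (the rewrite author's own statement) =====
-- stated objective: idiomatic
-- what changed: Replaces the char-by-char accumulator loop with a closed-form expression 2*s.count('(') - len(s) in a single list comprehension.
import Mathlib
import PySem

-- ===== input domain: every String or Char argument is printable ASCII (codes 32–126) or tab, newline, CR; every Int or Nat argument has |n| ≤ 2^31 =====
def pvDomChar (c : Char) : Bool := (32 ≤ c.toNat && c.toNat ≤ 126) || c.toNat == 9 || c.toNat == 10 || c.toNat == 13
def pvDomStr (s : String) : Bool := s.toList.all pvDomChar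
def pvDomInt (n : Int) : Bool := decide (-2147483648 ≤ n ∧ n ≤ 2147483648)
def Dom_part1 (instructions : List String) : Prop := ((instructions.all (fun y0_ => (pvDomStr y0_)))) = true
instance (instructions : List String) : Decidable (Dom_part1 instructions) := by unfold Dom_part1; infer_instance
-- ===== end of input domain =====

-- ===== PORT A =====
-- A: accumulate the floor char by char, appending per string.
def part1 (instructions : List String) : List Int :=
  instructions.foldl (fun floors s =>
    floors ++ [s.toList.foldl (fun floor c => if c == '(' then floor + 1 else floor - 1) (0 : Int)]) []

-- ===== PORT B =====
-- B: closed form 2*s.count('(') - len(s), one comprehension.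
def part1_alt (instructions : List String) : List Int :=
  instructions.map (fun s => 2 * (PySem.Str.count s "(" : Int) - PySem.Str.len s)

-- ===== PRECONDITION & SPEC =====
def Spec_part1 (instructions : List String) (out : List Int) : Prop := out = part1_alt instructions
instance (instructions : List String) (out : List Int) : Decidable (Spec_part1 instructions out) := by unfold Spec_part1; infer_instance

-- ===== CLAIM (what is proved, stated in full; the proofs are below) =====
def Claim_equal_part1 : Prop := ∀ (instructions : List String), Dom_part1 instructions → Spec_part1 instructions (part1 instructions)

-- ===== LEMMAS AND PROOFS =====

-- ===== VERDICT (by name: the statement is the Claim_ definition above) =====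
-- single-char substring count = element count
theorem chars_count_go_single (c : Char) (l : List Char) (acc : Nat) :
    PySem.Chars.count.go [c] l.length l acc = acc + l.count c := by
  induction l generalizing acc with
  | nil => simp [PySem.Chars.count.go]
  | cons h t ih =>
    simp only [List.length_cons, PySem.Chars.count.go, List.isPrefixOf, List.count_cons]
    by_cases hc : h = c
    · subst hc; simp [ih]; omega
    · simp [ih, hc, Ne.symm hc]

theorem str_count_single (s : String) :
    PySem.Str.count s "(" = s.toList.count '(' := by
  have h : PySem.Str.count s "(" = PySem.Chars.count s.toList ['('] := rfl
  rw [h]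
  simpa [PySem.Chars.count] using chars_count_go_single '(' s.toList 0

theorem foldl_floor (l : List Char) (a : Int) :
    l.foldl (fun floor c => if c == '(' then floor + 1 else floor - 1) a
      = a + 2 * (l.count '(' : Int) - l.length := by
  induction l generalizing a with
  | nil => simp
  | cons h t ih =>
    simp only [List.foldl_cons, ih, List.count_cons, List.length_cons]
    by_cases hc : h = '(' <;> simp [hc] <;> ring

theorem part1_spec : Claim_equal_part1 := by
  intro instructions _
  unfold Spec_part1 part1 part1_alt
  rw [PySem.List.foldl_append_singleton_eq_map]
  simp only [List.nil_append]
  apply List.map_congr_left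
  intro s _
  rw [foldl_floor, str_count_single, PySem.Str.len_eq]
  ring
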